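-- pv_equiv track=rewrite | github.com/ulyssedahiez/AP3 | Algorithmique/python/tp7-python/tp7.py | greatest_rec
-- ===== SOURCE A (Python) =====
-- def greatest_rec(list):
--     if (len(list)==1):
--         return [list[0]]
--     else:
--         if (list[1]<list[0]):
--             tmp = list[0]
--             list[0] = list[1]
--             list[1] = tmp
--         return greatest_rec(list[1:])+[list[0]]
-- ===== SOURCE B (Python) =====
-- def greatest_rec(list):
--     # single left-to-right pass: carry the running max, emit the min of each
--     # comparison; output = [overall max] + emitted mins reversed.
--     # (Unlike A, does not mutate its argument; return value is identical.)
--     r = list[0]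
--     mins = []
--     for x in list[1:]:
--         if x < r:
--             mins.append(x)
--         else:
--             mins.append(r)
--             r = x
--     mins.reverse()
--     return [r] + mins
-- ===== Notes on version B (the rewrite author's own statement) =====
-- stated objective: faster
-- what changed: Replaces the O(n^2) recursion (each level copies list[1:]) by one left-to-right pass that tracks the running max and collects the emitted mins, returning [max] + reversed mins.
import Mathlib
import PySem

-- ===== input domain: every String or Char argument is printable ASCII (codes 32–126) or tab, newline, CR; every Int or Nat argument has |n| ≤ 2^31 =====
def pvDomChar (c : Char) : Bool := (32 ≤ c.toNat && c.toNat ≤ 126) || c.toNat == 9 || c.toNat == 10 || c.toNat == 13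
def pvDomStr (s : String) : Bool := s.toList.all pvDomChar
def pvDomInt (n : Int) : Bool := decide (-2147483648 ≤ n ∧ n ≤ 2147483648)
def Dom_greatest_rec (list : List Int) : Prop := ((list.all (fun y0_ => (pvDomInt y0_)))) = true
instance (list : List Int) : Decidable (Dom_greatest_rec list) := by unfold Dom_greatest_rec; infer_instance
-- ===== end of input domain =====

-- B replaces A's O(n^2) recursion by a single O(n) running-max pass; equivalence is
-- about the RETURN value only (A may swap the first two elements of its argument in place, B does not mutate).

-- ===== PORT A =====
-- A: if len==1 return [list[0]]; else swap list[0],list[1] if list[1]<list[0], then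
-- recurse on list[1:] and append list[0]. After the (possible) swap, list[1:] starts
-- with max(a,b) and list[0] is min(a,b); [] is unreachable under Pre_ (Python raises IndexError).
def greatest_rec (list : List Int) : List Int :=
  match list with
  | [] => []
  | [x] => [x]
  | a :: b :: rest =>
      if b < a then greatest_rec (a :: rest) ++ [b]
      else greatest_rec (b :: rest) ++ [a]

-- ===== PORT B =====
-- step of Source B's loop: carry running max, append the min of the comparison
def grStep (p : Int × List Int) (x : Int) : Int × List Int :=
  if x < p.1 then (p.1, p.2 ++ [x]) else (x, p.2 ++ [p.1])

def greatest_rec_alt (list : List Int) : List Int :=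
  match list with
  | [] => []
  | r0 :: rest =>
      let p := rest.foldl grStep (r0, [])
      p.1 :: p.2.reverse

-- ===== PRECONDITION & SPEC =====
-- Pre_ excludes only the empty list, on which Python A raises IndexError (list[1]).
def Pre_greatest_rec (list : List Int) : Prop := list ≠ []
instance (list : List Int) : Decidable (Pre_greatest_rec list) := by unfold Pre_greatest_rec; infer_instance
def pvWitness_greatest_rec : List Int := [3, 1, 2]

def Spec_greatest_rec (list : List Int) (out : List Int) : Prop := out = greatest_rec_alt list
instance (list : List Int) (out : List Int) : Decidable (Spec_greatest_rec list out) := by unfold Spec_greatest_rec; infer_instance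

-- ===== CLAIM (what is proved, stated in full; the proofs are below) =====
def Claim_equal_greatest_rec : Prop := ∀ (list : List Int), Dom_greatest_rec list → Pre_greatest_rec list → Spec_greatest_rec list (greatest_rec list)

-- ===== LEMMAS AND PROOFS =====

-- accumulator lemma for Source B's loop: the collected mins are appended on the right
theorem grStep_acc (xs : List Int) (r : Int) (m : List Int) :
    xs.foldl grStep (r, m) = ((xs.foldl grStep (r, [])).1, m ++ (xs.foldl grStep (r, [])).2) := by
  induction xs generalizing r m with
  | nil => simp
  | cons y ys ih =>
      simp only [List.foldl_cons, grStep]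
      by_cases h : y < r
      · simp only [h, if_pos]
        rw [ih r (m ++ [y])]
        simp [ih r [y]]
      · simp only [h, if_neg, not_false_iff]
        rw [ih y (m ++ [r])]
        simp [ih y [r]]

theorem greatest_rec_eq_alt (xs : List Int) (a : Int) :
    greatest_rec (a :: xs) = greatest_rec_alt (a :: xs) := by
  induction xs generalizing a with
  | nil => simp [greatest_rec, greatest_rec_alt]
  | cons b rest ih =>
      simp only [greatest_rec]
      by_cases h : b < a
      · rw [if_pos h, ih a]
        simp [greatest_rec_alt, grStep, h, grStep_acc rest a [b]]
      · rw [if_neg h, ih b]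
        simp [greatest_rec_alt, grStep, h, grStep_acc rest b [a]]

-- ===== VERDICT (by name: the statement is the Claim_ definition above) =====
theorem greatest_rec_spec : Claim_equal_greatest_rec := by
  intro list _ hpre
  match list with
  | [] => exact absurd rfl hpre
  | a :: xs => exact greatest_rec_eq_alt xs a
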